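-- pv_equiv track=rewrite | github.com/CanKorkmazSU/Solving-Ballsort-Puzzle-Using-UCS-and-A-Search | BallSolverAST.py | tubeHeuristic
-- ===== SOURCE A (Python) =====
-- def tubeHeuristic(matrix, tno):
--     bottomColor = matrix[tno][0]
--     differentFound = False
--     heuristicCost = 0
--     if bottomColor == 0:
--         return 4
--     elif matrix[tno][1] == 0:
--         return 3
--     for i in range(3):
--         if matrix[tno][i+1] == bottomColor and differentFound == False:
--             continue
--         elif differentFound == False and matrix[tno][i+1] != bottomColor and matrix[tno][i+1] != 0:
--             heuristicCost += 2
--             differentFound = True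
--         elif differentFound == False and matrix[tno][i+1] != 0:
--             heuristicCost += 1
--             differentFound = True
--         elif differentFound and matrix[tno][i+1] == 0:
--             heuristicCost+=1
--     return heuristicCost
-- ===== SOURCE B (Python) =====
-- def tubeHeuristic(matrix, tno):
--     tube = matrix[tno]
--     bottomColor = tube[0]
--     if bottomColor == 0:
--         return 4
--     if tube[1] == 0:
--         return 3
--     # Top-down pass: count zeros seen so far from the top; every break cell
--     # (nonzero, wrong color) overwrites the answer with 2 + zeros above it,
--     # so the lowest break (the last one seen) wins.
--     best = 0
--     zeros = 0
--     for c in reversed(tube[1:4]):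
--         if c == 0:
--             zeros += 1
--         elif c != bottomColor:
--             best = 2 + zeros
--     return best
-- ===== Notes on version B (the rewrite author's own statement) =====
-- stated objective: alternative
-- what changed: Traverses the tube top-down (reversed) instead of bottom-up: counts zeros seen so far from the top and lets each wrong-color cell overwrite the answer with 2 + that zero count, so the lowest break wins; no found-flag state machine.
import Mathlib
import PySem

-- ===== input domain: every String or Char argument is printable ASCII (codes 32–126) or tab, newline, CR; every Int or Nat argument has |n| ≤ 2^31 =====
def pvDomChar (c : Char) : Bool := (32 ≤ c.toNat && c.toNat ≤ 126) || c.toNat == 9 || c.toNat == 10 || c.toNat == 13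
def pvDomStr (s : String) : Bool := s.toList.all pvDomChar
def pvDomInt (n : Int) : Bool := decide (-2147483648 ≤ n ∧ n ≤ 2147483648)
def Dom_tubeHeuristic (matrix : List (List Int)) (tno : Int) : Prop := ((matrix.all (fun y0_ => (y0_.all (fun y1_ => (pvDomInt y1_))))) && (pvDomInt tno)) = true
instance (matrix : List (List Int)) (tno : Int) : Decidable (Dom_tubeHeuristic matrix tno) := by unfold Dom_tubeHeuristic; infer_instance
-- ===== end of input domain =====

-- B replaces A's bottom-up found-flag state machine with a top-down (reversed) pass:
-- count zeros from the top, each wrong-color cell overwrites the answer (objective: alternative).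

-- ===== PORT A =====
-- literal transliteration of A: flag/accumulator fold over range(3)
def tubeHeuristic (matrix : List (List Int)) (tno : Int) : Int :=
  let tube := (PySem.List.pyGet? matrix tno).getD []
  let bottomColor := (PySem.List.pyGet? tube 0).getD 0
  if bottomColor = 0 then 4
  else if (PySem.List.pyGet? tube 1).getD 0 = 0 then 3
  else
    let st := (PySem.List.pyRange 0 3 1).foldl (fun (st : Bool × Int) i =>
      let differentFound := st.1
      let heuristicCost := st.2
      let c := (PySem.List.pyGet? tube (i + 1)).getD 0
      if c = bottomColor ∧ differentFound = false then st
      else if differentFound = false ∧ c ≠ bottomColor ∧ c ≠ 0 then (true, heuristicCost + 2)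
      else if differentFound = false ∧ c ≠ 0 then (true, heuristicCost + 1)
      else if differentFound = true ∧ c = 0 then (differentFound, heuristicCost + 1)
      else st) (false, 0)
    st.2

-- ===== PORT B =====
-- B's reverse traversal: state (best, zeros); zeros counts empties seen from the top,
-- every wrong-color nonzero cell overwrites best with 2 + zeros (lowest break wins)
def tubeHeuristic_alt (matrix : List (List Int)) (tno : Int) : Int :=
  let tube := (PySem.List.pyGet? matrix tno).getD []
  let bottomColor := (PySem.List.pyGet? tube 0).getD 0
  if bottomColor = 0 then 4
  else if (PySem.List.pyGet? tube 1).getD 0 = 0 then 3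
  else
    let st := ((PySem.List.slice tube (some 1) (some 4)).reverse).foldl
      (fun (st : Int × Int) c =>
        if c = 0 then (st.1, st.2 + 1)
        else if c ≠ bottomColor then (2 + st.2, st.2) else st) (0, 0)
    st.1

-- ===== PRECONDITION & SPEC =====
-- Pre_ = exactly the inputs where A returns: tno indexes matrix, the tube is nonempty,
-- and unless an early return fires (tube[0] = 0, or tube[1] = 0 with length ≥ 2) the
-- tube has the four cells A's loop reads.
def Pre_tubeHeuristic (matrix : List (List Int)) (tno : Int) : Prop :=
  (PySem.List.pyGet? matrix tno).isSome = true ∧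
  (1 ≤ ((PySem.List.pyGet? matrix tno).getD []).length ∧
    (((PySem.List.pyGet? matrix tno).getD []).getD 0 0 = 0 ∨
      (2 ≤ ((PySem.List.pyGet? matrix tno).getD []).length ∧
        (((PySem.List.pyGet? matrix tno).getD []).getD 1 0 = 0 ∨
          4 ≤ ((PySem.List.pyGet? matrix tno).getD []).length))))
instance (matrix : List (List Int)) (tno : Int) : Decidable (Pre_tubeHeuristic matrix tno) := by
  unfold Pre_tubeHeuristic; infer_instance

def pvWitness_tubeHeuristic : List (List Int) × Int := ([[1, 1, 2, 0]], 0)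

def Spec_tubeHeuristic (matrix : List (List Int)) (tno : Int) (out : Int) : Prop := out = tubeHeuristic_alt matrix tno
instance (matrix : List (List Int)) (tno : Int) (out : Int) : Decidable (Spec_tubeHeuristic matrix tno out) := by unfold Spec_tubeHeuristic; infer_instance

-- ===== CLAIM (what is proved, stated in full; the proofs are below) =====
def Claim_equal_tubeHeuristic : Prop := ∀ (matrix : List (List Int)) (tno : Int), Dom_tubeHeuristic matrix tno → Pre_tubeHeuristic matrix tno → Spec_tubeHeuristic matrix tno (tubeHeuristic matrix tno)

-- ===== LEMMAS AND PROOFS =====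

theorem pv_get1 (t0 t1 : Int) (rest : List Int) :
    PySem.List.pyGet? (t0 :: t1 :: rest) 1 = some t1 := by
  rw [show (1 : Int) = ((1 : Nat) : Int) from rfl, PySem.List.pyGet?_ofNat _ 1 (by simp)]; rfl

theorem pv_get2 (t0 t1 t2 : Int) (rest : List Int) :
    PySem.List.pyGet? (t0 :: t1 :: t2 :: rest) 2 = some t2 := by
  rw [show (2 : Int) = ((2 : Nat) : Int) from rfl, PySem.List.pyGet?_ofNat _ 2 (by simp)]; rfl

theorem pv_get3 (t0 t1 t2 t3 : Int) (rest : List Int) :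
    PySem.List.pyGet? (t0 :: t1 :: t2 :: t3 :: rest) 3 = some t3 := by
  rw [show (3 : Int) = ((3 : Nat) : Int) from rfl, PySem.List.pyGet?_ofNat _ 3 (by simp)]; rfl

theorem pv_range : PySem.List.pyRange 0 3 1 = [0, 1, 2] := by decide

theorem pv_slice14 (t0 t1 t2 t3 : Int) (rest : List Int) :
    PySem.List.slice (t0 :: t1 :: t2 :: t3 :: rest) (some 1) (some 4) = [t1, t2, t3] := by
  rw [PySem.List.slice_toNat _ (by norm_num) (by norm_num)]; rfl

-- ===== VERDICT (by name: the statement is the Claim_ definition above) =====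
set_option maxHeartbeats 1000000 in
theorem tubeHeuristic_spec : Claim_equal_tubeHeuristic := by
  intro matrix tno _ hpre
  unfold Spec_tubeHeuristic
  obtain ⟨hs, hpre2⟩ := hpre
  cases h : PySem.List.pyGet? matrix tno with
  | none => rw [h] at hs; simp at hs
  | some tube =>
    rw [h, Option.getD_some] at hpre2
    simp only [tubeHeuristic, tubeHeuristic_alt, h, Option.getD_some]
    match tube, hpre2 with
    | [], ⟨hl, _⟩ => simp at hl
    | t0 :: tl, ⟨hl, hrest⟩ =>
      rw [PySem.List.pyGet?_zero_cons, Option.getD_some]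
      by_cases ht0 : t0 = 0
      · simp [ht0]
      · simp only [List.getD_cons_zero] at hrest
        rcases hrest with h0 | ⟨hl2, hrest⟩
        · exact absurd h0 ht0
        match tl, hl2, hrest with
        | t1 :: tl2, _, hrest =>
          rw [pv_get1, Option.getD_some]
          by_cases ht1 : t1 = 0
          · simp [ht1]
          · simp only [List.getD_cons_succ, List.getD_cons_zero] at hrest
            rcases hrest with h1 | hl4
            · exact absurd h1 ht1
            match tl2, hl4 with
            | t2 :: t3 :: rest, _ =>
              rw [if_neg ht0, if_neg ht1]
              rw [pv_range, pv_slice14, show List.reverse [t1, t2, t3] = [t3, t2, t1] from rfl]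
              by_cases h1 : t1 = t0 <;> by_cases h2 : t2 = t0 <;> by_cases h2z : t2 = 0 <;>
                by_cases h3 : t3 = t0 <;> by_cases h3z : t3 = 0 <;>
                simp_all [List.foldl,
                  show (0 : Int) + 1 = 1 from rfl, show (1 : Int) + 1 = 2 from rfl,
                  show (2 : Int) + 1 = 3 from rfl,
                  pv_get1, pv_get2, pv_get3]
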